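-- pv_equiv track=rewrite | github.com/gipplab/PhysWikiQuiz | module1_formula_and_identifier_retrieval.py | convert_unit_dimensions
-- ===== SOURCE A (Python) =====
-- def convert_unit_dimensions(ISQ_dimensions):
--     """Convert unit from ISQ dimensions to SI units."""
--
--     unit_dimensions = ISQ_dimensions
--     # Translate into SI standard form
--     # mathsf_content = re.search(r'mathsf{(.*?)}', identifier_unit_dimension)
--     for expression in ['\mathsf', '{', '}']:
--         unit_dimensions = unit_dimensions.replace(expression, '')
--
--     # Map Symbol for dimension to SI unit symbol
--     # See https://en.wikipedia.org/wiki/International_System_of_Quantities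
--     mapping = {'L': 'm', 'M': 'kg', 'T': 's', 'I': 'A', '\Theta': 'K', 'N': 'mol', 'J': 'cd'}
--     for k,v in mapping.items():
--         try:
--             unit_dimensions = unit_dimensions.replace(k,v)
--         except:
--             pass
--     SI_dimensions = unit_dimensions
--
--     return SI_dimensions
-- ===== SOURCE B (Python) =====
-- def convert_unit_dimensions(ISQ_dimensions):
--     """Convert unit from ISQ dimensions to SI units (single left-to-right scan)."""
--     table = {'{': '', '}': '', 'L': 'm', 'M': 'kg', 'T': 's',
--              'I': 'A', 'N': 'mol', 'J': 'cd'}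
--     out = []
--     i = 0
--     s = ISQ_dimensions
--     while i < len(s):
--         if s.startswith('\\mathsf', i):
--             i += 7
--         elif s.startswith('\\Theta', i):
--             out.append('K')
--             i += 6
--         else:
--             c = s[i]
--             out.append(table.get(c, c))
--             i += 1
--     return ''.join(out)
-- ===== Notes on version B (the rewrite author's own statement) =====
-- stated objective: idiomatic
-- what changed: Replaces ten sequential str.replace scans by a single left-to-right greedy scanner that matches '\mathsf'/'\Theta' first and maps single characters through one translation table, so the string is traversed once.
-- intended difference: On inputs containing the substring '\Theta', A turns it into '\sheta' (the earlier T->s replacement consumes its T before the '\Theta'->K rule runs, so that rule never fires), while B returns 'K' there, which is the SI symbol the mapping table evidently intends. — e.g. on convert_unit_dimensions("\\Theta"): A returns "\\sheta", B returns "K"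
import Mathlib
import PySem

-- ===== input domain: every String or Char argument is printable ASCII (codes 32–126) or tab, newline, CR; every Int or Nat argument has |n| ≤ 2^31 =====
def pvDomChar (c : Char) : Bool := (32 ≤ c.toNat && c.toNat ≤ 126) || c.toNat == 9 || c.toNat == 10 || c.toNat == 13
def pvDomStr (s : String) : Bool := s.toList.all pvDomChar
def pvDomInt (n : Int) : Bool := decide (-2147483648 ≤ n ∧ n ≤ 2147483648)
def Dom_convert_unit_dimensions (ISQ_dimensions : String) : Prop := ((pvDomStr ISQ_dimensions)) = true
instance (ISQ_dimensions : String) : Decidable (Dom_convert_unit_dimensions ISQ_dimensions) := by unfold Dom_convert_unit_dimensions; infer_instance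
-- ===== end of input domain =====

-- B replaces ten sequential str.replace passes with one greedy left-to-right scan over a
-- translation table (idiomatic single pass); on inputs containing '\Theta' B returns the
-- intended 'K' where A's pass order mangles it to '\sheta' (see D_ below).

-- ===== PORT A =====
-- A: ten sequential replace passes; the try/except around replace is a no-op (str.replace never raises).
def convert_unit_dimensions (ISQ_dimensions : String) : String :=
  let unit_dimensions := ISQ_dimensions
  let unit_dimensions :=
    ["\\mathsf", "{", "}"].foldl
      (fun unit_dimensions expression => PySem.Str.replace unit_dimensions expression "") unit_dimensions
  let mapping : List (String × String) :=
    [("L", "m"), ("M", "kg"), ("T", "s"), ("I", "A"), ("\\Theta", "K"), ("N", "mol"), ("J", "cd")]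
  let SI_dimensions :=
    mapping.foldl (fun unit_dimensions kv => PySem.Str.replace unit_dimensions kv.1 kv.2) unit_dimensions
  SI_dimensions

-- ===== PORT B =====
-- the two multi-character tokens of Source B's scanner, as character lists
def pvMathsf : List Char := "\\mathsf".toList
def pvThetaL : List Char := "\\Theta".toList

-- Source B's translation table (table.get(c, c), ported exactly as an if-chain over the dict's eight keys)
def pvTableB (c : Char) : List Char :=
  if c = '{' then [] else if c = '}' then []
  else if c = 'L' then ['m'] else if c = 'M' then ['k', 'g']
  else if c = 'T' then ['s'] else if c = 'I' then ['A']
  else if c = 'N' then ['m', 'o', 'l'] else if c = 'J' then ['c', 'd']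
  else [c]

-- Source B's while loop: one greedy left-to-right scan (startswith '\mathsf' / '\Theta', else table)
def pvScanB : List Char → List Char
  | [] => []
  | c :: rest =>
    if pvMathsf.isPrefixOf (c :: rest) then pvScanB (List.drop 7 (c :: rest))
    else if pvThetaL.isPrefixOf (c :: rest) then 'K' :: pvScanB (List.drop 6 (c :: rest))
    else pvTableB c ++ pvScanB rest
termination_by l => l.length
decreasing_by all_goals simp

def convert_unit_dimensions_alt (ISQ_dimensions : String) : String :=
  String.ofList (pvScanB ISQ_dimensions.toList)

-- ===== PRECONDITION & SPEC =====
-- On inputs containing the substring '\Theta', A returns it as '\sheta' (the earlier T->s replace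
-- consumes its 'T' before the '\Theta'->K rule runs, so that rule never fires), while B returns 'K',
-- the SI symbol A's own mapping table evidently intends.
def D_convert_unit_dimensions (ISQ_dimensions : String) : Prop :=
  PySem.Str.isIn "\\Theta" ISQ_dimensions = true
instance (ISQ_dimensions : String) : Decidable (D_convert_unit_dimensions ISQ_dimensions) := by
  unfold D_convert_unit_dimensions; infer_instance

def Spec_convert_unit_dimensions (ISQ_dimensions : String) (out : String) : Prop :=
  ¬ D_convert_unit_dimensions ISQ_dimensions → out = convert_unit_dimensions_alt ISQ_dimensions
instance (ISQ_dimensions : String) (out : String) : Decidable (Spec_convert_unit_dimensions ISQ_dimensions out) := by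
  unfold Spec_convert_unit_dimensions; infer_instance

def pvDiffWitness_convert_unit_dimensions : String := "\\Theta"
def pvDiffWitnessOut_convert_unit_dimensions : String × String := ("\\sheta", "K")

-- ===== CLAIM (what is proved, stated in full; the proofs are below) =====
def Claim_unchanged_convert_unit_dimensions : Prop :=
  ∀ (ISQ_dimensions : String), Dom_convert_unit_dimensions ISQ_dimensions →
    Spec_convert_unit_dimensions ISQ_dimensions (convert_unit_dimensions ISQ_dimensions)
def Claim_changed_convert_unit_dimensions : Prop :=
  Dom_convert_unit_dimensions (pvDiffWitness_convert_unit_dimensions) ∧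
  D_convert_unit_dimensions (pvDiffWitness_convert_unit_dimensions) ∧
  convert_unit_dimensions (pvDiffWitness_convert_unit_dimensions) = pvDiffWitnessOut_convert_unit_dimensions.1 ∧
  convert_unit_dimensions_alt (pvDiffWitness_convert_unit_dimensions) = pvDiffWitnessOut_convert_unit_dimensions.2 ∧
  pvDiffWitnessOut_convert_unit_dimensions.1 ≠ pvDiffWitnessOut_convert_unit_dimensions.2
def Claim_exact_convert_unit_dimensions : Prop :=
  ∀ (ISQ_dimensions : String), Dom_convert_unit_dimensions ISQ_dimensions →
    D_convert_unit_dimensions ISQ_dimensions →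
    convert_unit_dimensions ISQ_dimensions ≠ convert_unit_dimensions_alt ISQ_dimensions

-- ===== LEMMAS AND PROOFS =====

-- fuel-indexed form of PySem.Chars.replace's scanner, without the accumulator
def pvReplF (old new : List Char) : Nat → List Char → List Char
  | 0, l => l
  | _ + 1, [] => []
  | fuel + 1, c :: t =>
      if old.isPrefixOf (c :: t) then new ++ pvReplF old new fuel (List.drop old.length (c :: t))
      else c :: pvReplF old new fuel t

theorem pvGo_eq (old new : List Char) (fuel : Nat) :
    ∀ (l acc : List Char),
      PySem.Chars.replace.go old new fuel l acc = acc.reverse ++ pvReplF old new fuel l := by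
  induction fuel with
  | zero => intro l acc; simp [PySem.Chars.replace.go, pvReplF]
  | succ n ih =>
    intro l acc
    cases l with
    | nil => simp [PySem.Chars.replace.go, pvReplF]
    | cons c t =>
      rw [PySem.Chars.replace.go]
      by_cases hp : old.isPrefixOf (c :: t)
      · simp only [pvReplF, hp, if_pos, ih]
        simp
      · simp only [pvReplF, hp, if_false, Bool.false_eq_true, ih]
        simp

theorem pvReplace_cons_eq (l : List Char) (c : Char) (cs new : List Char) :
    PySem.Chars.replace l (c :: cs) new = pvReplF (c :: cs) new l.length l := by
  simp [PySem.Chars.replace, pvGo_eq]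

theorem pvSingle_eq (k : Char) (v : List Char) (fuel : Nat) :
    ∀ (l : List Char), l.length ≤ fuel →
      pvReplF [k] v fuel l = l.flatMap (fun c => if c = k then v else [c]) := by
  induction fuel with
  | zero =>
    intro l h
    cases l with
    | nil => simp [pvReplF]
    | cons c t => simp at h
  | succ n ih =>
    intro l h
    cases l with
    | nil => simp [pvReplF]
    | cons c t =>
      have hlt : t.length ≤ n := by simp at h; omega
      by_cases hc : c = k
      · subst hc
        have hp : ([c].isPrefixOf (c :: t)) = true := by simp [List.isPrefixOf]
        simp [pvReplF, hp, ih t hlt]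
      · have hp : ([k].isPrefixOf (c :: t)) = false := by
          simp [List.isPrefixOf, beq_eq_false_iff_ne, Ne.symm hc]
        simp [pvReplF, hp, hc, ih t hlt]

-- after the T->s pass no 'T' remains
theorem pvNoT_T (l : List Char) :
    'T' ∉ l.flatMap (fun c => if c = 'T' then ['s'] else [c]) := by
  simp only [List.mem_flatMap, not_exists]
  intro c
  by_cases h : c = 'T' <;> simp [h]
  exact fun _ heq => h heq.symm

theorem pvNoT_I (l : List Char) (h : 'T' ∉ l) :
    'T' ∉ l.flatMap (fun c => if c = 'I' then ['A'] else [c]) := by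
  simp only [List.mem_flatMap, not_exists]
  intro c
  by_cases hc : c = 'I' <;> simp [hc]
  exact fun hm heq => h (heq ▸ hm)

-- the '\Theta' -> 'K' pass of A is a no-op on 'T'-free strings
theorem pvTheta_id (v : List Char) (fuel : Nat) :
    ∀ (l : List Char), 'T' ∉ l → pvReplF pvThetaL v fuel l = l := by
  induction fuel with
  | zero => intro l _; rfl
  | succ n ih =>
    intro l h
    cases l with
    | nil => simp [pvReplF]
    | cons c t =>
      have hp : (pvThetaL.isPrefixOf (c :: t)) = false := by
        by_contra hb
        have hb' : pvThetaL.isPrefixOf (c :: t) = true := by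
          cases hx : pvThetaL.isPrefixOf (c :: t) with
          | true => rfl
          | false => exact absurd hx hb
        obtain ⟨r, hr⟩ := List.isPrefixOf_iff_prefix.mp hb'
        apply h
        rw [← hr]
        simp [show pvThetaL = ['\\', 'T', 'h', 'e', 't', 'a'] from rfl]
      simp only [pvReplF, hp, Bool.false_eq_true, if_false]
      rw [ih t (fun hm => h (List.mem_cons_of_mem _ hm))]

-- one character through the seven single-character passes = one table lookup
theorem pvHead_eq (c : Char) :
    List.flatMap (fun c => if c = 'J' then ['c', 'd'] else [c])
      (List.flatMap (fun c => if c = 'N' then ['m', 'o', 'l'] else [c])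
        (List.flatMap (fun c => if c = 'I' then ['A'] else [c])
          (List.flatMap (fun c => if c = 'T' then ['s'] else [c])
            (List.flatMap (fun c => if c = 'M' then ['k', 'g'] else [c])
              (List.flatMap (fun c => if c = 'L' then ['m'] else [c])
                (List.flatMap (fun c => if c = '}' then [] else [c])
                  (if c = '{' then [] else [c]))))))) = pvTableB c := by
  by_cases h1 : c = '{'; · subst h1; rfl
  by_cases h2 : c = '}'; · subst h2; rfl
  by_cases h3 : c = 'L'; · subst h3; rfl
  by_cases h4 : c = 'M'; · subst h4; rfl
  by_cases h5 : c = 'T'; · subst h5; rfl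
  by_cases h6 : c = 'I'; · subst h6; rfl
  by_cases h7 : c = 'N'; · subst h7; rfl
  by_cases h8 : c = 'J'; · subst h8; rfl
  simp [pvTableB, h1, h2, h3, h4, h5, h6, h7, h8]

-- the seven single-character passes collapse to Source B's one table map
theorem pvChain_eq (l : List Char) :
    ((((((((l.flatMap (fun c => if c = '{' then [] else [c])).flatMap
        (fun c => if c = '}' then [] else [c])).flatMap
        (fun c => if c = 'L' then ['m'] else [c])).flatMap
        (fun c => if c = 'M' then ['k', 'g'] else [c])).flatMap
        (fun c => if c = 'T' then ['s'] else [c])).flatMap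
        (fun c => if c = 'I' then ['A'] else [c])).flatMap
        (fun c => if c = 'N' then ['m', 'o', 'l'] else [c])).flatMap
        (fun c => if c = 'J' then ['c', 'd'] else [c])) = l.flatMap pvTableB := by
  induction l with
  | nil => rfl
  | cons c t ih =>
    simp only [List.flatMap_cons, List.flatMap_append]
    rw [ih, pvHead_eq]

-- A's whole pipeline, normalised: remove '\mathsf', then map every char through the table
theorem pvA_toList (s : String) :
    (convert_unit_dimensions s).toList =
      (pvReplF pvMathsf [] s.toList.length s.toList).flatMap pvTableB := by
  unfold convert_unit_dimensions
  simp only [List.foldl, PySem.Str.replace, String.toList_ofList]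
  rw [show ("\\mathsf" : String).toList = pvMathsf from rfl,
      show ("\\Theta" : String).toList = pvThetaL from rfl,
      show ("{" : String).toList = ['{'] from rfl,
      show ("}" : String).toList = ['}'] from rfl,
      show ("L" : String).toList = ['L'] from rfl,
      show ("M" : String).toList = ['M'] from rfl,
      show ("T" : String).toList = ['T'] from rfl,
      show ("I" : String).toList = ['I'] from rfl,
      show ("N" : String).toList = ['N'] from rfl,
      show ("J" : String).toList = ['J'] from rfl,
      show ("m" : String).toList = ['m'] from rfl,
      show ("kg" : String).toList = ['k', 'g'] from rfl,
      show ("s" : String).toList = ['s'] from rfl,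
      show ("A" : String).toList = ['A'] from rfl,
      show ("mol" : String).toList = ['m', 'o', 'l'] from rfl,
      show ("cd" : String).toList = ['c', 'd'] from rfl,
      show ("K" : String).toList = ['K'] from rfl,
      show ("" : String).toList = ([] : List Char) from rfl]
  rw [show pvMathsf = '\\' :: "mathsf".toList from rfl,
      show pvThetaL = '\\' :: "Theta".toList from rfl]
  simp only [pvReplace_cons_eq]
  rw [show ('\\' :: "mathsf".toList) = pvMathsf from rfl,
      show ('\\' :: "Theta".toList) = pvThetaL from rfl]
  rw [pvSingle_eq '{' [] _ _ (le_refl _), pvSingle_eq '}' [] _ _ (le_refl _),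
      pvSingle_eq 'L' ['m'] _ _ (le_refl _), pvSingle_eq 'M' ['k', 'g'] _ _ (le_refl _),
      pvSingle_eq 'T' ['s'] _ _ (le_refl _), pvSingle_eq 'I' ['A'] _ _ (le_refl _)]
  rw [pvTheta_id ['K'] _ _ (pvNoT_I _ (pvNoT_T _))]
  rw [pvSingle_eq 'N' ['m', 'o', 'l'] _ _ (le_refl _), pvSingle_eq 'J' ['c', 'd'] _ _ (le_refl _)]
  exact pvChain_eq _

-- main simulation: A's normal form equals B's single scan on '\Theta'-free input
theorem pvMain (fuel : Nat) :
    ∀ (l : List Char), l.length ≤ fuel →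
      (∀ j, ¬ (pvThetaL <+: List.drop j l)) →
      (pvReplF pvMathsf [] fuel l).flatMap pvTableB = pvScanB l := by
  induction fuel with
  | zero =>
    intro l h _
    cases l with
    | nil => simp [pvReplF, pvScanB]
    | cons c t => simp at h
  | succ n ih =>
    intro l hlen H
    cases l with
    | nil => simp [pvReplF, pvScanB]
    | cons c t =>
      by_cases hp : pvMathsf.isPrefixOf (c :: t)
      · rw [show pvReplF pvMathsf [] (n + 1) (c :: t)
              = pvReplF pvMathsf [] n (List.drop 7 (c :: t)) from by
            simp only [pvReplF, hp, if_true]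
            rw [show pvMathsf.length = 7 from rfl]
            simp]
        rw [pvScanB, if_pos hp]
        exact ih _ (by simp at hlen ⊢; omega)
          (fun j => by rw [List.drop_drop]; exact H (7 + j))
      · have hθ : ¬ (pvThetaL.isPrefixOf (c :: t)) := by
          intro hc
          exact H 0 (by simpa using List.isPrefixOf_iff_prefix.mp hc)
        rw [show pvReplF pvMathsf [] (n + 1) (c :: t)
              = c :: pvReplF pvMathsf [] n t from by
            simp only [pvReplF]
            rw [if_neg hp]]
        rw [pvScanB, if_neg hp, if_neg hθ]
        rw [List.flatMap_cons,
            ih t (by simp at hlen; omega) (fun j => by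
              rw [← List.drop_succ_cons (l := t) (a := c)]; exact H (j + 1))]

-- pvReplF does not depend on the fuel once it covers the input length
theorem pvReplF_fuel (old new : List Char) (hold : old ≠ []) :
    ∀ (f1 f2 : Nat) (l : List Char), l.length ≤ f1 → l.length ≤ f2 →
      pvReplF old new f1 l = pvReplF old new f2 l := by
  intro f1
  induction f1 with
  | zero =>
    intro f2 l h1 _
    cases l with
    | nil => cases f2 <;> rfl
    | cons c t => simp at h1
  | succ n ih =>
    intro f2 l h1 h2
    cases l with
    | nil => cases f2 <;> rfl
    | cons c t =>
      cases f2 with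
      | zero => simp at h2
      | succ m =>
        have hone : 1 ≤ old.length := by
          cases old with
          | nil => exact absurd rfl hold
          | cons a as => simp
        by_cases hp : old.isPrefixOf (c :: t)
        · rw [show pvReplF old new (n + 1) (c :: t)
                = new ++ pvReplF old new n (List.drop old.length (c :: t)) from by
              simp only [pvReplF]; rw [if_pos hp],
              show pvReplF old new (m + 1) (c :: t)
                = new ++ pvReplF old new m (List.drop old.length (c :: t)) from by
              simp only [pvReplF]; rw [if_pos hp]]
          rw [ih m (List.drop old.length (c :: t)) (by simp at h1 ⊢; omega) (by simp at h2 ⊢; omega)]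
        · rw [show pvReplF old new (n + 1) (c :: t) = c :: pvReplF old new n t from by
              simp only [pvReplF]; rw [if_neg hp],
              show pvReplF old new (m + 1) (c :: t) = c :: pvReplF old new m t from by
              simp only [pvReplF]; rw [if_neg hp]]
          rw [ih m t (by simp at h1; omega) (by simp at h2; omega)]

-- a token starting with a character other than backslash is never '\mathsf'
theorem pvMathsf_not_prefix (c : Char) (t : List Char) (h : c ≠ '\\') :
    ¬ (pvMathsf.isPrefixOf (c :: t) = true) := by
  rw [show pvMathsf = '\\' :: "mathsf".toList from rfl]
  simp only [List.isPrefixOf, Bool.and_eq_true, beq_iff_eq]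
  exact fun hx => h hx.1.symm

-- B's scan never produces a longer string than A's pipeline
theorem pvLen_le (l : List Char) :
    (pvScanB l).length ≤ (List.flatMap pvTableB (pvReplF pvMathsf [] l.length l)).length := by
  induction l using pvScanB.induct with
  | case1 => simp [pvReplF, pvScanB]
  | case2 c rest hp ih =>
    rw [pvScanB, if_pos hp]
    rw [show pvReplF pvMathsf [] (c :: rest).length (c :: rest)
          = pvReplF pvMathsf [] rest.length (List.drop 7 (c :: rest)) from by
        simp only [List.length_cons, pvReplF]
        rw [if_pos hp, show pvMathsf.length = 7 from rfl]
        simp]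
    rw [pvReplF_fuel pvMathsf [] (by decide) rest.length (List.drop 7 (c :: rest)).length
        (List.drop 7 (c :: rest)) (by simp) (le_refl _)]
    exact ih
  | case3 c rest hmp hp ih =>
    obtain ⟨r, hr⟩ := List.isPrefixOf_iff_prefix.mp hp
    rw [show pvThetaL = ['\\', 'T', 'h', 'e', 't', 'a'] from rfl] at hr
    have hc : c = '\\' := by
      have := congrArg (fun x => x.head?) hr; simpa using this.symm
    have hrest : rest = 'T' :: 'h' :: 'e' :: 't' :: 'a' :: r := by
      have := congrArg (fun x => x.tail) hr; simpa using this.symm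
    subst hc; subst hrest
    have hd6 : List.drop 6 ('\\' :: 'T' :: 'h' :: 'e' :: 't' :: 'a' :: r) = r := rfl
    rw [pvScanB, if_neg hmp, if_pos hp, hd6]
    have hA : pvReplF pvMathsf [] ('\\' :: 'T' :: 'h' :: 'e' :: 't' :: 'a' :: r).length
          ('\\' :: 'T' :: 'h' :: 'e' :: 't' :: 'a' :: r)
        = '\\' :: 'T' :: 'h' :: 'e' :: 't' :: 'a' :: pvReplF pvMathsf [] r.length r := by
      simp only [List.length_cons]
      rw [show pvReplF pvMathsf [] (r.length + 1 + 1 + 1 + 1 + 1 + 1)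
              ('\\' :: 'T' :: 'h' :: 'e' :: 't' :: 'a' :: r)
            = '\\' :: pvReplF pvMathsf [] (r.length + 1 + 1 + 1 + 1 + 1)
              ('T' :: 'h' :: 'e' :: 't' :: 'a' :: r) from by
          simp only [pvReplF]; rw [if_neg hmp]]
      rw [show pvReplF pvMathsf [] (r.length + 1 + 1 + 1 + 1 + 1)
              ('T' :: 'h' :: 'e' :: 't' :: 'a' :: r)
            = 'T' :: pvReplF pvMathsf [] (r.length + 1 + 1 + 1 + 1)
              ('h' :: 'e' :: 't' :: 'a' :: r) from by
          simp only [pvReplF]; rw [if_neg (pvMathsf_not_prefix _ _ (by decide))]]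
      rw [show pvReplF pvMathsf [] (r.length + 1 + 1 + 1 + 1) ('h' :: 'e' :: 't' :: 'a' :: r)
            = 'h' :: pvReplF pvMathsf [] (r.length + 1 + 1 + 1) ('e' :: 't' :: 'a' :: r) from by
          simp only [pvReplF]; rw [if_neg (pvMathsf_not_prefix _ _ (by decide))]]
      rw [show pvReplF pvMathsf [] (r.length + 1 + 1 + 1) ('e' :: 't' :: 'a' :: r)
            = 'e' :: pvReplF pvMathsf [] (r.length + 1 + 1) ('t' :: 'a' :: r) from by
          simp only [pvReplF]; rw [if_neg (pvMathsf_not_prefix _ _ (by decide))]]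
      rw [show pvReplF pvMathsf [] (r.length + 1 + 1) ('t' :: 'a' :: r)
            = 't' :: pvReplF pvMathsf [] (r.length + 1) ('a' :: r) from by
          simp only [pvReplF]; rw [if_neg (pvMathsf_not_prefix _ _ (by decide))]]
      rw [show pvReplF pvMathsf [] (r.length + 1) ('a' :: r)
            = 'a' :: pvReplF pvMathsf [] r.length r from by
          simp only [pvReplF]; rw [if_neg (pvMathsf_not_prefix _ _ (by decide))]]
    rw [hA]
    have hr' : (pvScanB r).length
        ≤ (List.flatMap pvTableB (pvReplF pvMathsf [] r.length r)).length := by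
      have := ih
      rw [hd6] at this
      exact this
    simp only [List.flatMap_cons,
      show pvTableB '\\' = ['\\'] from rfl, show pvTableB 'T' = ['s'] from rfl,
      show pvTableB 'h' = ['h'] from rfl, show pvTableB 'e' = ['e'] from rfl,
      show pvTableB 't' = ['t'] from rfl, show pvTableB 'a' = ['a'] from rfl,
      List.length_append, List.length_cons]
    omega
  | case4 c rest hmp hp ih =>
    rw [pvScanB, if_neg hmp, if_neg hp]
    rw [show pvReplF pvMathsf [] (c :: rest).length (c :: rest)
          = c :: pvReplF pvMathsf [] rest.length rest from by
        simp only [List.length_cons, pvReplF]; rw [if_neg hmp]]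
    simp only [List.flatMap_cons, List.length_append]
    omega

-- and it is strictly shorter as soon as the input contains '\Theta'
theorem pvLen_lt (l : List Char) (hocc : ∃ j, pvThetaL <+: List.drop j l) :
    (pvScanB l).length < (List.flatMap pvTableB (pvReplF pvMathsf [] l.length l)).length := by
  induction l using pvScanB.induct with
  | case1 =>
    obtain ⟨j, hj⟩ := hocc
    rw [show pvThetaL = ['\\', 'T', 'h', 'e', 't', 'a'] from rfl] at hj
    simp at hj
  | case2 c rest hp ih =>
    obtain ⟨j, hj⟩ := hocc
    obtain ⟨r, hr⟩ := List.isPrefixOf_iff_prefix.mp hp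
    have hd7 : List.drop 7 (c :: rest) = r := by
      rw [← hr, show pvMathsf = ['\\', 'm', 'a', 't', 'h', 's', 'f'] from rfl]; rfl
    by_cases h7 : 7 ≤ j
    · have hocc' : ∃ j', pvThetaL <+: List.drop j' (List.drop 7 (c :: rest)) := by
        refine ⟨j - 7, ?_⟩
        rw [List.drop_drop, show 7 + (j - 7) = j from by omega]
        exact hj
      have := ih hocc'
      rw [pvScanB, if_pos hp]
      rw [show pvReplF pvMathsf [] (c :: rest).length (c :: rest)
            = pvReplF pvMathsf [] rest.length (List.drop 7 (c :: rest)) from by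
          simp only [List.length_cons, pvReplF]
          rw [if_pos hp, show pvMathsf.length = 7 from rfl]
          simp]
      rw [pvReplF_fuel pvMathsf [] (by decide) rest.length (List.drop 7 (c :: rest)).length
          (List.drop 7 (c :: rest)) (by simp) (le_refl _)]
      exact this
    · exfalso
      rw [← hr, show pvMathsf = ['\\', 'm', 'a', 't', 'h', 's', 'f'] from rfl,
          show pvThetaL = ['\\', 'T', 'h', 'e', 't', 'a'] from rfl] at hj
      interval_cases j <;> simp [List.cons_prefix_cons] at hj
  | case3 c rest hmp hp ih =>
    obtain ⟨r, hr⟩ := List.isPrefixOf_iff_prefix.mp hp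
    rw [show pvThetaL = ['\\', 'T', 'h', 'e', 't', 'a'] from rfl] at hr
    have hc : c = '\\' := by
      have := congrArg (fun x => x.head?) hr; simpa using this.symm
    have hrest : rest = 'T' :: 'h' :: 'e' :: 't' :: 'a' :: r := by
      have := congrArg (fun x => x.tail) hr; simpa using this.symm
    subst hc; subst hrest
    have hd6 : List.drop 6 ('\\' :: 'T' :: 'h' :: 'e' :: 't' :: 'a' :: r) = r := rfl
    rw [pvScanB, if_neg hmp, if_pos hp, hd6]
    have hA : pvReplF pvMathsf [] ('\\' :: 'T' :: 'h' :: 'e' :: 't' :: 'a' :: r).length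
          ('\\' :: 'T' :: 'h' :: 'e' :: 't' :: 'a' :: r)
        = '\\' :: 'T' :: 'h' :: 'e' :: 't' :: 'a' :: pvReplF pvMathsf [] r.length r := by
      simp only [List.length_cons]
      rw [show pvReplF pvMathsf [] (r.length + 1 + 1 + 1 + 1 + 1 + 1)
              ('\\' :: 'T' :: 'h' :: 'e' :: 't' :: 'a' :: r)
            = '\\' :: pvReplF pvMathsf [] (r.length + 1 + 1 + 1 + 1 + 1)
              ('T' :: 'h' :: 'e' :: 't' :: 'a' :: r) from by
          simp only [pvReplF]; rw [if_neg hmp]]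
      rw [show pvReplF pvMathsf [] (r.length + 1 + 1 + 1 + 1 + 1)
              ('T' :: 'h' :: 'e' :: 't' :: 'a' :: r)
            = 'T' :: pvReplF pvMathsf [] (r.length + 1 + 1 + 1 + 1)
              ('h' :: 'e' :: 't' :: 'a' :: r) from by
          simp only [pvReplF]; rw [if_neg (pvMathsf_not_prefix _ _ (by decide))]]
      rw [show pvReplF pvMathsf [] (r.length + 1 + 1 + 1 + 1) ('h' :: 'e' :: 't' :: 'a' :: r)
            = 'h' :: pvReplF pvMathsf [] (r.length + 1 + 1 + 1) ('e' :: 't' :: 'a' :: r) from by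
          simp only [pvReplF]; rw [if_neg (pvMathsf_not_prefix _ _ (by decide))]]
      rw [show pvReplF pvMathsf [] (r.length + 1 + 1 + 1) ('e' :: 't' :: 'a' :: r)
            = 'e' :: pvReplF pvMathsf [] (r.length + 1 + 1) ('t' :: 'a' :: r) from by
          simp only [pvReplF]; rw [if_neg (pvMathsf_not_prefix _ _ (by decide))]]
      rw [show pvReplF pvMathsf [] (r.length + 1 + 1) ('t' :: 'a' :: r)
            = 't' :: pvReplF pvMathsf [] (r.length + 1) ('a' :: r) from by
          simp only [pvReplF]; rw [if_neg (pvMathsf_not_prefix _ _ (by decide))]]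
      rw [show pvReplF pvMathsf [] (r.length + 1) ('a' :: r)
            = 'a' :: pvReplF pvMathsf [] r.length r from by
          simp only [pvReplF]; rw [if_neg (pvMathsf_not_prefix _ _ (by decide))]]
    rw [hA]
    have hr' : (pvScanB r).length
        ≤ (List.flatMap pvTableB (pvReplF pvMathsf [] r.length r)).length := pvLen_le r
    simp only [List.flatMap_cons,
      show pvTableB '\\' = ['\\'] from rfl, show pvTableB 'T' = ['s'] from rfl,
      show pvTableB 'h' = ['h'] from rfl, show pvTableB 'e' = ['e'] from rfl,
      show pvTableB 't' = ['t'] from rfl, show pvTableB 'a' = ['a'] from rfl,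
      List.length_append, List.length_cons]
    omega
  | case4 c rest hmp hp ih =>
    obtain ⟨j, hj⟩ := hocc
    cases j with
    | zero =>
      exact absurd (List.isPrefixOf_iff_prefix.mpr (by simpa using hj)) hp
    | succ j' =>
      rw [List.drop_succ_cons] at hj
      have := ih ⟨j', hj⟩
      rw [pvScanB, if_neg hmp, if_neg hp]
      rw [show pvReplF pvMathsf [] (c :: rest).length (c :: rest)
            = c :: pvReplF pvMathsf [] rest.length rest from by
          simp only [List.length_cons, pvReplF]; rw [if_neg hmp]]
      simp only [List.flatMap_cons, List.length_append]
      omega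

-- ===== VERDICT (by name: the statements are the Claim_ definitions above) =====
theorem convert_unit_dimensions_spec : Claim_unchanged_convert_unit_dimensions := by
  unfold Claim_unchanged_convert_unit_dimensions Spec_convert_unit_dimensions
  intro s _ hD
  apply String.toList_inj.mp
  rw [pvA_toList, convert_unit_dimensions_alt, String.toList_ofList]
  apply pvMain _ _ (le_refl _)
  intro j hpre
  apply hD
  unfold D_convert_unit_dimensions
  rw [PySem.Str.isIn_iff_infix]
  exact List.IsInfix.trans hpre.isInfix (List.drop_suffix j s.toList).isInfix

set_option maxRecDepth 8192 in
theorem convert_unit_dimensions_changed : Claim_changed_convert_unit_dimensions := by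
  unfold Claim_changed_convert_unit_dimensions
  refine ⟨by decide, by decide, by decide, ?_, by decide⟩
  -- evaluate B's scan by its equations (pvScanB is defined by well-founded recursion)
  show convert_unit_dimensions_alt "\\Theta" = "K"
  unfold convert_unit_dimensions_alt
  rw [show ("\\Theta" : String).toList = pvThetaL from rfl,
      show pvThetaL = ['\\', 'T', 'h', 'e', 't', 'a'] from rfl]
  rw [pvScanB]
  norm_num [pvMathsf, pvThetaL, List.isPrefixOf, pvScanB]
  decide

theorem convert_unit_dimensions_tight : Claim_exact_convert_unit_dimensions := by
  unfold Claim_exact_convert_unit_dimensions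
  intro s _ hD heq
  have hlist := congrArg String.toList heq
  rw [pvA_toList, convert_unit_dimensions_alt, String.toList_ofList] at hlist
  have hocc : ∃ j, pvThetaL <+: List.drop j s.toList := by
    have h1 : PySem.Chars.isIn ("\\Theta".toList) s.toList = true :=
      (PySem.Chars.isIn_iff_infix _ _).mpr ((PySem.Str.isIn_iff_infix _ _).mp hD)
    exact (PySem.Chars.exists_prefix_drop_iff_isIn _ _).mpr h1
  have hlt := pvLen_lt s.toList hocc
  rw [hlist] at hlt
  exact lt_irrefl _ hlt
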